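-- pv_equiv track=rewrite | github.com/dayu-autostreamer/dayu-industrial-software | dependency/core/lib/estimation/priority_estimation.py | split_list_into_chunks_last
-- ===== SOURCE A (Python) =====
-- def split_list_into_chunks_last(list_input, n):
--     chunk_size, remainder = divmod(len(list_input), n)
--     chunks_last = []
--     start = 0
--     for i in range(n):
--         end = start + chunk_size + (1 if i < remainder else 0)
--         chunks_last.append(list_input[end - 1])
--         start = end
--
--     return chunks_last
-- ===== SOURCE B (Python) =====
-- def split_list_into_chunks_last(list_input, n):
--     chunk_size, remainder = divmod(len(list_input), n)
--     return [list_input[(i + 1) * chunk_size + min(i + 1, remainder) - 1]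
--             for i in range(n)]
-- ===== Notes on version B (the rewrite author's own statement) =====
-- stated objective: simpler
-- what changed: B drops the running start/end accumulator and the append loop: each chunk's last-element index is computed in closed form, end_i - 1 = (i+1)*chunk_size + min(i+1, remainder) - 1, inside a single comprehension.
import Mathlib
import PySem

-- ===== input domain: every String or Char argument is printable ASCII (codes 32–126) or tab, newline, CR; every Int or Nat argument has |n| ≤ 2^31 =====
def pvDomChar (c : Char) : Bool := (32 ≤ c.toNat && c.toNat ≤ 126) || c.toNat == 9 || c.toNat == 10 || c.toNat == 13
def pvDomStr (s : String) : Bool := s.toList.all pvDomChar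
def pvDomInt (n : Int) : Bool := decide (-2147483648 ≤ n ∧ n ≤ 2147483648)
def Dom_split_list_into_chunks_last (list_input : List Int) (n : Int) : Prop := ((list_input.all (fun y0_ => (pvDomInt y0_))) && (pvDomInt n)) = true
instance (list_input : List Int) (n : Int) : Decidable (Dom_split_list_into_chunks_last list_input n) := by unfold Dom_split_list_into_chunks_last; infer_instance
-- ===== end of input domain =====

-- B drops A's running start/end accumulator: each chunk's last index is the closed form
-- (i+1)*chunk_size + min(i+1, remainder) - 1, computed in a single map over range(n).

-- ===== PORT A =====
def split_list_into_chunks_last (list_input : List Int) (n : Int) : List Int :=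
  let cr := (PySem.Int.divmod? (PySem.List.len list_input) n).getD (0, 0)
  ((PySem.List.pyRange 0 n 1).foldl
    (fun (st : List Int × Int) i =>
      let e := st.2 + cr.1 + (if i < cr.2 then 1 else 0)
      (st.1 ++ [(PySem.List.pyGet? list_input (e - 1)).getD 0], e))
    ([], 0)).1

-- ===== PORT B =====
def split_list_into_chunks_last_alt (list_input : List Int) (n : Int) : List Int :=
  let cr := (PySem.Int.divmod? (PySem.List.len list_input) n).getD (0, 0)
  (PySem.List.pyRange 0 n 1).map
    (fun i => (PySem.List.pyGet? list_input ((i + 1) * cr.1 + min (i + 1) cr.2 - 1)).getD 0)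

-- ===== PRECONDITION & SPEC =====
-- Pre_ excludes exactly the inputs where Python A raises: n = 0 (ZeroDivisionError in divmod)
-- and 0 < n with an empty list (IndexError on list_input[-1]).
def Pre_split_list_into_chunks_last (list_input : List Int) (n : Int) : Prop :=
  n ≠ 0 ∧ (0 < n → list_input ≠ [])
instance (list_input : List Int) (n : Int) : Decidable (Pre_split_list_into_chunks_last list_input n) := by unfold Pre_split_list_into_chunks_last; infer_instance

def pvWitness_split_list_into_chunks_last : List Int × Int := ([1, 2, 3, 4, 5], 2)

def Spec_split_list_into_chunks_last (list_input : List Int) (n : Int) (out : List Int) : Prop := out = split_list_into_chunks_last_alt list_input n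
instance (list_input : List Int) (n : Int) (out : List Int) : Decidable (Spec_split_list_into_chunks_last list_input n out) := by unfold Spec_split_list_into_chunks_last; infer_instance

-- ===== CLAIM (what is proved, stated in full; the proofs are below) =====
def Claim_equal_split_list_into_chunks_last : Prop := ∀ (list_input : List Int) (n : Int), Dom_split_list_into_chunks_last list_input n → Pre_split_list_into_chunks_last list_input n → Spec_split_list_into_chunks_last list_input n (split_list_into_chunks_last list_input n)

-- ===== LEMMAS AND PROOFS =====

-- The loop invariant: starting A's fold at index a with accumulated start a*cs + min a rem
-- produces acc ++ the closed-form map of B over the remaining range.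
lemma chunk_loop (l : List Int) (cs rem : Int) :
    ∀ (k : Nat) (a nn : Int) (acc : List Int) (s : Int), 0 ≤ a → (nn - a).toNat ≤ k →
    s = a * cs + min a rem →
    ((PySem.List.pyRange a nn 1).foldl
      (fun (st : List Int × Int) i =>
        let e := st.2 + cs + (if i < rem then 1 else 0)
        (st.1 ++ [(PySem.List.pyGet? l (e - 1)).getD 0], e))
      (acc, s)).1
    = acc ++ (PySem.List.pyRange a nn 1).map
        (fun i => (PySem.List.pyGet? l ((i + 1) * cs + min (i + 1) rem - 1)).getD 0) := by
  intro k
  induction k with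
  | zero =>
    intro a nn acc s ha hk hs
    rw [PySem.List.pyRange_one_eq_nil (by omega)]
    simp
  | succ k ih =>
    intro a nn acc s ha hk hs
    by_cases hlt : a < nn
    · rw [PySem.List.pyRange_one_cons hlt]
      simp only [List.foldl_cons, List.map_cons]
      have hstep : s + cs + (if a < rem then 1 else 0)
          = (a + 1) * cs + min (a + 1) rem := by
        rw [hs]
        split_ifs with h
        · have h1 : min a rem = a := by omega
          have h2 : min (a + 1) rem = a + 1 := by omega
          rw [h1, h2]; ring
        · have h1 : min a rem = rem := by omega
          have h2 : min (a + 1) rem = rem := by omega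
          rw [h1, h2]; ring
      rw [hstep]
      have := ih (a + 1) nn
        (acc ++ [(PySem.List.pyGet? l ((a + 1) * cs + min (a + 1) rem - 1)).getD 0])
        ((a + 1) * cs + min (a + 1) rem) (by omega) (by omega) rfl
      rw [this, List.append_assoc]
      rfl
    · rw [PySem.List.pyRange_one_eq_nil (by omega)]
      simp

-- ===== VERDICT (by name: the statement is the Claim_ definition above) =====
theorem split_list_into_chunks_last_spec : Claim_equal_split_list_into_chunks_last := by
  intro l n _ hpre
  obtain ⟨hn0, _⟩ := hpre
  unfold Spec_split_list_into_chunks_last split_list_into_chunks_last split_list_into_chunks_last_alt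
  simp only [PySem.Int.divmod?, if_neg hn0, Option.getD_some]
  by_cases hpos : 0 < n
  · have hrem : 0 ≤ ((l.length : Int)).fmod n := PySem.Int.mod_nonneg _ hpos
    exact chunk_loop l (((l.length : Int)).fdiv n) (((l.length : Int)).fmod n)
      n.toNat 0 n [] 0 le_rfl (by omega) (by simp [min_eq_left hrem])
  · rw [PySem.List.pyRange_one_eq_nil (by omega)]
    simp
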